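-- pv_equiv track=rewrite | github.com/mazent/varie | pybase/utili.py | gomsm
-- ===== SOURCE A (Python) =====
-- def gomsm(conv, div):
--     """
--         Converte un tempo in millisecondi in una stringa
--     """
--     if conv[-1] < div[0]:
--         return conv
--
--     resto = conv[-1] % div[0]
--     qznt = conv[-1] // div[0]
--
--     conv = conv[:len(conv) - 1]
--     conv = conv + (resto, qznt)
--
--     div = div[1:]
--
--     if any(div):
--         return gomsm(conv, div)
--
--     return conv
-- ===== SOURCE B (Python) =====
-- def gomsm(conv, div):
--     """
--         Converte un tempo in millisecondi in una stringa
--     """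
--     n = 1
--     for i, d in enumerate(div):
--         if d:
--             n = i + 1
--     parts = list(conv[:-1])
--     v = conv[-1]
--     for d in div[:n]:
--         if v < d:
--             break
--         parts.append(v % d)
--         v //= d
--     return tuple(parts) + (v,)
-- ===== Notes on version B (the rewrite author's own statement) =====
-- stated objective: faster
-- what changed: Replaces A's recursion, which rebuilds the whole tuple and re-slices div and re-runs any() at every step, by one pre-pass finding the last nonzero divisor (A's any() stop rule) followed by a single iterative pass appending one remainder per divisor to an accumulator list.
-- outside the precondition, e.g. on gomsm((5,), (-2, 0, 9)): A returns (-1, -3), B returns (-1, -3); on gomsm((7,), (3, -5, 0, 2)): A returns (1, -3, -1), B returns (1, -3, -1); on gomsm((7,), (2, 0, 2)): A raises ZeroDivisionError, B raises ZeroDivisionError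
import Mathlib
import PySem

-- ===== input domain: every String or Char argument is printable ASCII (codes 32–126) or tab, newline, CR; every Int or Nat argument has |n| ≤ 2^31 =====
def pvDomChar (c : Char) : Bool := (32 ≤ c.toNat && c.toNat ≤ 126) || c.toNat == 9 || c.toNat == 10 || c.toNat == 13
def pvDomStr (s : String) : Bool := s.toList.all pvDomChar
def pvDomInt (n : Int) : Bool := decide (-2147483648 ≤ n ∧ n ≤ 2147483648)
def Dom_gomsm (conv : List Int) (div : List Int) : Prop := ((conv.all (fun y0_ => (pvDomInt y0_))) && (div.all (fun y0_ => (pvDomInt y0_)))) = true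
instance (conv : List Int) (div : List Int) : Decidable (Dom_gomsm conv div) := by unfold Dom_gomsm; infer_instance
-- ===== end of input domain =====

-- B replaces A's recursion (which rebuilds the whole tuple and re-runs any() at
-- every step) by a pre-pass locating the last nonzero divisor followed by one
-- iterative pass with an accumulator (objective: faster, linear instead of quadratic).

-- termination helper for port A (div[1:] is strictly shorter)
theorem pv_slice_tail_lt (xs : List Int) (h : xs ≠ []) :
    (PySem.List.slice xs (some 1) none).length < xs.length := by
  cases xs with
  | nil => exact absurd rfl h
  | cons x xs =>
    have : PySem.List.slice (x :: xs) (some 1) none = (x :: xs).drop 1 := by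
      simpa using PySem.List.slice_from_natCast (x :: xs) 1
    simp [this]

-- ===== PORT A =====
def gomsm (conv : List Int) (div : List Int) : List Int :=
  match h1 : PySem.List.pyGet? conv (-1), h2 : PySem.List.pyGet? div 0 with
  | some last, some d0 =>
    if last < d0 then conv
    else
      let resto := PySem.Int.mod last d0
      let qznt := PySem.Int.floordiv last d0
      let conv2 := PySem.List.slice conv none (some ((conv.length : Int) - 1)) ++ [resto, qznt]
      let div2 := PySem.List.slice div (some 1) none
      if div2.any (fun d => d != 0) then gomsm conv2 div2 else conv2
  | _, _ => conv  -- Python raises IndexError here (conv or div empty); outside Pre_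
termination_by div.length
decreasing_by
  exact pv_slice_tail_lt div (by intro h; subst h; simp [PySem.List.pyGet?] at h2)

-- ===== PORT B =====
-- Source B's first loop: 'for i, d in enumerate(div): if d: n = i + 1', carrying (i, n)
def gomsmLastNZ : List Int → Nat → Nat → Nat
  | [], _, n => n
  | d :: rest, i, n => gomsmLastNZ rest (i + 1) (if d ≠ 0 then i + 1 else n)

-- Source B's second loop: 'for d in div[:n]' (break when v < d), carrying (parts, v)
def gomsmLoop (parts : List Int) (v : Int) (div : List Int) : List Int × Int :=
  match div with
  | [] => (parts, v)
  | d :: rest =>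
    if v < d then (parts, v)
    else gomsmLoop (parts ++ [PySem.Int.mod v d]) (PySem.Int.floordiv v d) rest

def gomsm_alt (conv : List Int) (div : List Int) : List Int :=
  match PySem.List.pyGet? conv (-1) with
  | none => []  -- Python raises IndexError (conv empty); outside Pre_
  | some v =>
    let n := gomsmLastNZ div 0 1
    let parts := PySem.List.slice conv none (some (-1))
    let r := gomsmLoop parts v (PySem.List.slice div none (some (n : Int)))
    r.1 ++ [r.2]

-- ===== PRECONDITION & SPEC =====
-- shape helper for Pre_: the zeros of the list (if any) form a trailing run
def pvZerosTrailing : List Int → Bool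
  | [] => true
  | d :: rest => if d = 0 then rest.all (fun x => x = 0) else pvZerosTrailing rest

-- Pre_ excludes empty conv and empty div (IndexError at conv[-1] / div[0]) and, unless
-- the first comparison conv[-1] < div[0] already returns, divisor lists that start with 0
-- or have a zero before a nonzero: on those A (and B identically) raises ZeroDivisionError
-- whenever the running quotient reaches a zero divisor non-negatively — a condition on
-- intermediate quotients, not expressible in closed form on the input, so the whole region
-- is excluded even though A (and B, with the same value) returns on a fringe of it where
-- the quotient turns negative before the zero divisor.
def Pre_gomsm (conv : List Int) (div : List Int) : Prop :=
  conv ≠ [] ∧ div ≠ [] ∧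
    (PySem.List.pyGetD conv (-1) 0 < PySem.List.pyGetD div 0 0 ∨
      (PySem.List.pyGetD div 0 0 ≠ 0 ∧ pvZerosTrailing div = true))
instance (conv : List Int) (div : List Int) : Decidable (Pre_gomsm conv div) := by
  unfold Pre_gomsm; infer_instance

def pvWitness_gomsm : List Int × List Int := ([3723400], [1000, 60, 60])

def Spec_gomsm (conv : List Int) (div : List Int) (out : List Int) : Prop := out = gomsm_alt conv div
instance (conv : List Int) (div : List Int) (out : List Int) : Decidable (Spec_gomsm conv div out) := by unfold Spec_gomsm; infer_instance

-- ===== CLAIM (what is proved, stated in full; the proofs are below) =====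
def Claim_equal_gomsm : Prop := ∀ (conv : List Int) (div : List Int), Dom_gomsm conv div → Pre_gomsm conv div → Spec_gomsm conv div (gomsm conv div)

-- ===== LEMMAS AND PROOFS =====

theorem pv_slice_dropLast (xs : List Int) :
    PySem.List.slice xs none (some ((xs.length : Int) - 1)) = xs.dropLast := by
  cases xs with
  | nil => simpa using PySem.List.slice_to_neg_one ([] : List Int)
  | cons x xs =>
    have hb : ((x :: xs).length : Int) - 1 = ((xs.length : Nat) : Int) := by simp
    rw [hb, PySem.List.slice_to_natCast]
    rw [List.dropLast_eq_take]
    simp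

-- Source B's first loop returns at least 1
theorem pv_lastNZ_pos (div : List Int) : ∀ (i n : Nat), 1 ≤ n → 1 ≤ gomsmLastNZ div i n := by
  induction div with
  | nil => intro i n h; simpa [gomsmLastNZ] using h
  | cons d rest ih =>
    intro i n h
    simp only [gomsmLastNZ]
    exact ih (i + 1) _ (by split <;> omega)

-- the first loop ignores an all-zero list
theorem pv_lastNZ_zeros (zs : List Int) (hz : ∀ x ∈ zs, x = 0) :
    ∀ (i n : Nat), gomsmLastNZ zs i n = n := by
  induction zs with
  | nil => intro i n; rfl
  | cons z rest ih =>
    intro i n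
    have hz0 : z = 0 := hz z (by simp)
    simp only [gomsmLastNZ, hz0]
    exact ih (fun x hx => hz x (by simp [hx])) (i + 1) n

-- on a zero-free block followed by zeros, the first loop finds the block's end
theorem pv_lastNZ_append (p : List Int) : p ≠ [] → (∀ x ∈ p, x ≠ 0) →
    ∀ (zs : List Int), (∀ x ∈ zs, x = 0) → ∀ (i n : Nat),
      gomsmLastNZ (p ++ zs) i n = i + p.length := by
  induction p with
  | nil => intro h; exact absurd rfl h
  | cons d p' ih =>
    intro _ hp zs hz i n
    have hd : d ≠ 0 := hp d (by simp)
    simp only [List.cons_append, gomsmLastNZ, if_pos hd]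
    cases hp' : p' with
    | nil =>
      subst hp'
      simp only [List.nil_append]
      rw [pv_lastNZ_zeros zs hz]
      simp
    | cons q qs =>
      subst hp'
      rw [ih (by simp) (fun x hx => hp x (by simp [hx])) zs hz (i + 1) (i + 1)]
      simp
      omega

-- a trailing-zeros-only list splits into a zero-free prefix and an all-zero suffix
theorem pv_decomp (div : List Int) (h : pvZerosTrailing div = true) :
    ∃ p zs, div = p ++ zs ∧ (∀ x ∈ p, x ≠ 0) ∧ (∀ x ∈ zs, x = 0) := by
  induction div with
  | nil => exact ⟨[], [], rfl, by simp, by simp⟩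
  | cons d rest ih =>
    by_cases hd : d = 0
    · refine ⟨[], d :: rest, rfl, by simp, ?_⟩
      simp only [pvZerosTrailing, if_pos hd] at h
      intro x hx
      rcases List.mem_cons.mp hx with h1 | h2
      · exact h1.trans hd
      · exact of_decide_eq_true (List.all_eq_true.mp h x h2)
    · simp only [pvZerosTrailing, if_neg hd] at h
      obtain ⟨p, zs, rfl, hp, hz⟩ := ih h
      exact ⟨d :: p, zs, rfl, by
        intro x hx; rcases List.mem_cons.mp hx with h1 | h2
        · exact h1 ▸ hd
        · exact hp x h2, hz⟩

-- main invariant: A's recursion over a zero-free block followed by zeros equals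
-- B's second loop over the block alone
theorem pv_main (p : List Int) : p ≠ [] → (∀ x ∈ p, x ≠ 0) →
    ∀ (zs : List Int), (∀ x ∈ zs, x = 0) → ∀ (parts : List Int) (v : Int),
      gomsm (parts ++ [v]) (p ++ zs) =
        (gomsmLoop parts v p).1 ++ [(gomsmLoop parts v p).2] := by
  induction p with
  | nil => intro h; exact absurd rfl h
  | cons d p' ih =>
    intro _ hp zs hz parts v
    have hd : d ≠ 0 := hp d (by simp)
    rw [gomsm]
    rw [PySem.List.pyGet?_neg_one_append_singleton]
    rw [List.cons_append, PySem.List.pyGet?_zero_cons]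
    simp only
    by_cases hlt : v < d
    · simp [hlt, gomsmLoop]
    · simp only [hlt, if_false]
      rw [pv_slice_dropLast, List.dropLast_concat]
      have htail : PySem.List.slice (d :: (p' ++ zs)) (some 1) none = p' ++ zs := by
        simpa using PySem.List.slice_from_one (d :: (p' ++ zs))
      rw [htail]
      cases hp' : p' with
      | nil =>
        subst hp'
        have : zs.any (fun x => x != 0) = false := by
          simp only [List.any_eq_false]
          intro x hx
          simp [hz x hx]
        simp [this, gomsmLoop, hlt]
      | cons q qs =>
        subst hp'
        have hq : q ≠ 0 := hp q (by simp)
        have hany : ((q :: qs) ++ zs).any (fun x => x != 0) = true := by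
          simp only [List.any_eq_true]
          exact ⟨q, by simp, by simpa using hq⟩
        simp only [List.cons_append] at hany
        simp only [List.cons_append, hany, if_true]
        have hrec := ih (by simp) (fun x hx => hp x (by simp [hx])) zs hz
          (parts ++ [PySem.Int.mod v d]) (PySem.Int.floordiv v d)
        rw [List.append_assoc] at hrec
        simp only [List.cons_append, List.nil_append] at hrec
        rw [hrec]
        rw [show gomsmLoop parts v (d :: q :: qs)
              = gomsmLoop (parts ++ [PySem.Int.mod v d]) (PySem.Int.floordiv v d) (q :: qs) from by
            simp [gomsmLoop, hlt]]

-- ===== VERDICT (by name: the statement is the Claim_ definition above) =====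
theorem gomsm_spec : Claim_equal_gomsm := by
  intro conv div _ hpre
  obtain ⟨hc, hd, hcase⟩ := hpre
  unfold Spec_gomsm
  obtain ⟨parts, v, rfl⟩ : ∃ parts v, conv = parts ++ [v] := by
    rcases List.eq_nil_or_concat conv with h | ⟨ps, x, h⟩
    · exact absurd h hc
    · exact ⟨ps, x, by simpa using h⟩
  obtain ⟨d0, rest, rfl⟩ : ∃ d0 rest, div = d0 :: rest := by
    cases div with
    | nil => exact absurd rfl hd
    | cons d0 rest => exact ⟨d0, rest, rfl⟩
  rcases hcase with hlt | ⟨hd0, htr⟩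
  · -- immediate return: conv[-1] < div[0], both sides give back conv
    rw [PySem.List.pyGetD_neg_one_append_singleton, PySem.List.pyGetD_zero_cons] at hlt
    rw [gomsm]
    rw [PySem.List.pyGet?_neg_one_append_singleton, PySem.List.pyGet?_zero_cons]
    simp only [hlt, if_true]
    unfold gomsm_alt
    rw [PySem.List.pyGet?_neg_one_append_singleton]
    simp only
    rw [PySem.List.slice_to_neg_one, List.dropLast_concat]
    obtain ⟨m, hm⟩ : ∃ m, gomsmLastNZ (d0 :: rest) 0 1 = m + 1 := by
      have := pv_lastNZ_pos (d0 :: rest) 0 1 (by omega)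
      exact ⟨gomsmLastNZ (d0 :: rest) 0 1 - 1, by omega⟩
    rw [hm, PySem.List.slice_to_natCast]
    simp [List.take_succ_cons, gomsmLoop, hlt]
  · -- general case: div = zero-free prefix ++ zeros, head nonzero
    rw [PySem.List.pyGetD_zero_cons] at hd0
    obtain ⟨p, zs, hsplit, hp, hz⟩ := pv_decomp (d0 :: rest) htr
    have hpne : p ≠ [] := by
      intro h
      subst h
      simp only [List.nil_append] at hsplit
      have : d0 ∈ zs := by rw [← hsplit]; simp
      exact hd0 (hz d0 this)
    rw [hsplit, pv_main p hpne hp zs hz parts v]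
    unfold gomsm_alt
    rw [PySem.List.pyGet?_neg_one_append_singleton]
    simp only
    rw [PySem.List.slice_to_neg_one, List.dropLast_concat]
    rw [pv_lastNZ_append p hpne hp zs hz 0 1]
    simp only [Nat.zero_add]
    rw [PySem.List.slice_to_natCast, List.take_left]
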